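-- pv_equiv track=rewrite | github.com/Owlbearpig/TeraLayer2 | data_evaluation/scratches/snippets/base_converters.py | invert_bin
-- ===== SOURCE A (Python) =====
-- def invert_bin(s):
--     res = ""
--     for b in s:
--         if b == "0":
--             res += "1"
--         elif b == "1":
--             res += "0"
--         else:
--             res += b
--     return res
-- ===== SOURCE B (Python) =====
-- def invert_bin(s):
--     # classic swap via a sentinel: three whole-string replace passes,
--     # no per-character branching; '\x00' cannot occur in text input
--     return s.replace("0", "\x00").replace("1", "0").replace("\x00", "1")
-- ===== Notes on version B (the rewrite author's own statement) =====
-- stated objective: alternative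
-- what changed: Replaces A's per-character branch loop with repeated concatenation by the classic sentinel swap: three whole-string replace passes ('0'->NUL, '1'->'0', NUL->'1'), so no per-character branching is written at all; correct on text input since NUL never occurs in it.
import Mathlib
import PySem

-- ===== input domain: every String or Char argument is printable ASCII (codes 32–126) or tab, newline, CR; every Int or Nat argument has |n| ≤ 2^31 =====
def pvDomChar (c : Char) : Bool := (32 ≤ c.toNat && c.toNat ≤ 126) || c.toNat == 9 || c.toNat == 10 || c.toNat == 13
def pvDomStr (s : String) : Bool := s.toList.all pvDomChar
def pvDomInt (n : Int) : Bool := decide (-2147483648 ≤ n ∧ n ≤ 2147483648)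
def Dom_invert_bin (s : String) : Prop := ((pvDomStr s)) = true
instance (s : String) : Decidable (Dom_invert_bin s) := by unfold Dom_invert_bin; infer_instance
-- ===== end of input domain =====

-- B replaces A's per-character branch loop by the classic sentinel swap: three whole-string replace passes (alternative; return value only).

-- ===== PORT A =====
-- literal port of A: accumulate the result character by character, branching on each char
def invert_bin (s : String) : String :=
  String.ofList (s.toList.foldl
    (fun res b =>
      if b = '0' then res ++ ['1']
      else if b = '1' then res ++ ['0']
      else res ++ [b]) [])

-- ===== PORT B =====
-- port of B: s.replace("0","\x00").replace("1","0").replace("\x00","1")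
def invert_bin_alt (s : String) : String :=
  PySem.Str.replace (PySem.Str.replace (PySem.Str.replace s "0" "\u0000") "1" "0") "\u0000" "1"

-- ===== PRECONDITION & SPEC =====
def Spec_invert_bin (s : String) (out : String) : Prop := out = invert_bin_alt s
instance (s : String) (out : String) : Decidable (Spec_invert_bin s out) := by unfold Spec_invert_bin; infer_instance

-- ===== CLAIM (what is proved, stated in full; the proofs are below) =====
def Claim_equal_invert_bin : Prop := ∀ (s : String), Dom_invert_bin s → Spec_invert_bin s (invert_bin s)

-- ===== LEMMAS AND PROOFS =====

-- single-character replace is a map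
lemma replace_go_single (a b : Char) (l acc : List Char) (fuel : Nat) (h : l.length ≤ fuel) :
    PySem.Chars.replace.go [a] [b] fuel l acc
      = acc.reverse ++ l.map (fun c => if c = a then b else c) := by
  induction l generalizing acc fuel with
  | nil => cases fuel <;> simp [PySem.Chars.replace.go]
  | cons c t ih =>
    cases fuel with
    | zero => simp at h
    | succ n =>
      simp only [List.length_cons, Nat.succ_le_succ_iff] at h
      by_cases hc : c = a
      · have hpre : List.isPrefixOf [a] (c :: t) = true := by
          simp [List.isPrefixOf, hc]
        simp [PySem.Chars.replace.go, hpre, hc, ih _ _ h]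
      · have hpre : List.isPrefixOf [a] (c :: t) = false := by
          simp [List.isPrefixOf]; exact fun h' => (hc h'.symm).elim
        simp [PySem.Chars.replace.go, hpre, hc, ih _ _ h]

lemma replace_single (a b : Char) (l : List Char) :
    PySem.Chars.replace l [a] [b] = l.map (fun c => if c = a then b else c) := by
  simp [PySem.Chars.replace, replace_go_single a b l [] l.length le_rfl]

-- A's foldl, with the accumulator pulled out, is a per-character map
lemma invert_foldl_eq (l : List Char) (acc : List Char) :
    l.foldl
      (fun res b =>
        if b = '0' then res ++ ['1']
        else if b = '1' then res ++ ['0']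
        else res ++ [b]) acc
    = acc ++ l.map (fun c => if c = '0' then '1' else if c = '1' then '0' else c) := by
  induction l generalizing acc with
  | nil => simp
  | cons c t ih =>
    simp only [List.foldl_cons, List.map_cons, ih]
    by_cases h0 : c = '0'
    · simp [h0]
    · by_cases h1 : c = '1'
      · simp [h1]
      · simp [h0, h1]

-- ===== VERDICT (by name: the statement is the Claim_ definition above) =====
theorem invert_bin_spec : Claim_equal_invert_bin := by
  intro s hdom
  show _ = _
  have hdom' : ∀ c ∈ s.toList, pvDomChar c = true := by
    simpa [Dom_invert_bin, pvDomStr, List.all_eq_true] using hdom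
  apply String.toList_injective
  simp only [invert_bin, invert_bin_alt, PySem.Str.toList_replace,
    String.toList_ofList, invert_foldl_eq, List.nil_append]
  have h0 : ("0" : String).toList = ['0'] := rfl
  have h1 : ("1" : String).toList = ['1'] := rfl
  have hn : ("\u0000" : String).toList = ['\u0000'] := rfl
  rw [h0, h1, hn, replace_single, replace_single, replace_single,
    List.map_map, List.map_map]
  apply List.map_congr_left
  intro c hc
  have : c ≠ '\u0000' := by
    have := hdom' c hc
    simp [pvDomChar] at this
    intro h; subst h; simp [Char.toNat] at this
  by_cases h0' : c = '0'
  · simp [Function.comp, h0']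
  · by_cases h1' : c = '1'
    · simp [Function.comp, h1']
    · simp [Function.comp, h0', h1', this]
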